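-- pv_equiv track=rewrite | github.com/mattyding/seq2seq-OCR | testing-and-evaluation/times_process.py | clean_text_v1_5
-- ===== SOURCE A (Python) =====
-- import string
--
-- def clean_text_v1_5(text):
--     text = text.lower()
--     text.strip("")
--
--     new_text = ""
--     for char in text:
--         if char not in string.ascii_lowercase + " ":
--             continue
--         new_text += char
--
--     return new_text
-- ===== SOURCE B (Python) =====
-- import re
--
-- def clean_text_v1_5(text):
--     return re.sub(r'[^a-z ]', '', text.lower())
-- ===== Notes on version B (the rewrite author's own statement) =====
-- stated objective: idiomatic
-- what changed: Replaces the explicit per-character loop with membership test and repeated string concatenation by a single regex substitution over the lowered text.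
import Mathlib
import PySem

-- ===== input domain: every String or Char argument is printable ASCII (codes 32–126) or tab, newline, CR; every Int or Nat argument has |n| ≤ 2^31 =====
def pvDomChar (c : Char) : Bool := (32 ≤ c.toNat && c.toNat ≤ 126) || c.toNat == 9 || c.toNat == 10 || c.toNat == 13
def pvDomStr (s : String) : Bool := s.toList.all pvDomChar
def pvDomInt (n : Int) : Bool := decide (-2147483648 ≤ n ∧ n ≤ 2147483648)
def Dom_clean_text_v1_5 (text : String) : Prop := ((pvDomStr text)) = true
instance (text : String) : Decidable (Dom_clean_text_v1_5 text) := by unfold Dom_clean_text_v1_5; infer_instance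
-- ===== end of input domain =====

-- B replaces A's per-character loop, membership test and string concatenation with a single
-- regex-style substitution over the lowered string (objective: idiomatic).
-- A's 'text.strip("")' line is dead code (its result is discarded) and is not ported.

-- ===== PORT A =====
-- literal port of A: lower, then loop over chars, skipping those not in ascii_lowercase + " "
def clean_text_v1_5 (text : String) : String :=
  let text := PySem.Str.lower text
  let new_text : List Char :=
    text.toList.foldl (fun acc c =>
      if ("abcdefghijklmnopqrstuvwxyz ".toList.contains c) = false then acc
      else acc ++ [c]) []
  String.mk new_text

-- ===== PORT B =====
-- port of B: re.sub(r'[^a-z ]', '', text.lower()) — keep exactly the chars matching [a-z ]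
def clean_text_v1_5_alt (text : String) : String :=
  String.mk ((PySem.Str.lower text).toList.filter
    (fun c => ('a' ≤ c && c ≤ 'z') || c == ' '))

-- ===== PRECONDITION & SPEC =====
def Spec_clean_text_v1_5 (text : String) (out : String) : Prop := out = clean_text_v1_5_alt text
instance (text : String) (out : String) : Decidable (Spec_clean_text_v1_5 text out) := by unfold Spec_clean_text_v1_5; infer_instance

-- ===== CLAIM (what is proved, stated in full; the proofs are below) =====
def Claim_equal_clean_text_v1_5 : Prop := ∀ (text : String), Dom_clean_text_v1_5 text → Spec_clean_text_v1_5 text (clean_text_v1_5 text)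

-- ===== LEMMAS AND PROOFS =====

-- A's membership test in ascii_lowercase + " " equals B's character-class test [a-z ]
lemma mem_alpha_iff (c : Char) :
    ("abcdefghijklmnopqrstuvwxyz ".toList.contains c) = (('a' ≤ c && c ≤ 'z') || c == ' ') := by
  have hl : "abcdefghijklmnopqrstuvwxyz ".toList =
      ['a','b','c','d','e','f','g','h','i','j','k','l','m','n','o','p','q','r','s','t','u','v','w','x','y','z',' '] := by decide
  have hinj : ∀ d : Char, (c = d) ↔ (c.toNat = d.toNat) :=
    fun d => ⟨fun h => by rw [h], fun h => Char.ext (by exact UInt32.toNat_inj.mp h)⟩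
  have hle : ∀ d : Char, (d ≤ c) ↔ (d.toNat ≤ c.toNat) := fun d => by
    rw [Char.le_def, UInt32.le_iff_toNat_le]; rfl
  have hle' : ∀ d : Char, (c ≤ d) ↔ (c.toNat ≤ d.toNat) := fun d => by
    rw [Char.le_def, UInt32.le_iff_toNat_le]; rfl
  rw [hl]
  apply Bool.eq_iff_iff.mpr
  simp only [List.contains_eq_mem, List.mem_cons, List.not_mem_nil, or_false,
    Bool.or_eq_true, Bool.and_eq_true, decide_eq_true_eq, beq_iff_eq, hinj, hle, hle']
  simp only [show ('a'.toNat = 97) from rfl, show ('b'.toNat = 98) from rfl, show ('c'.toNat = 99) from rfl, show ('d'.toNat = 100) from rfl, show ('e'.toNat = 101) from rfl, show ('f'.toNat = 102) from rfl, show ('g'.toNat = 103) from rfl, show ('h'.toNat = 104) from rfl, show ('i'.toNat = 105) from rfl, show ('j'.toNat = 106) from rfl, show ('k'.toNat = 107) from rfl, show ('l'.toNat = 108) from rfl, show ('m'.toNat = 109) from rfl, show ('n'.toNat = 110) from rfl, show ('o'.toNat = 111) from rfl, show ('p'.toNat = 112) from rfl, show ('q'.toNat = 113) from rfl, show ('r'.toNat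 = 114) from rfl, show ('s'.toNat = 115) from rfl, show ('t'.toNat = 116) from rfl, show ('u'.toNat = 117) from rfl, show ('v'.toNat = 118) from rfl, show ('w'.toNat = 119) from rfl, show ('x'.toNat = 120) from rfl, show ('y'.toNat = 121) from rfl, show ('z'.toNat = 122) from rfl, show (' '.toNat = 32) from rfl]
  omega

lemma if_false_swap (b : Bool) (x y : List Char) :
    (if b = false then x else y) = if b then y else x := by cases b <;> rfl

-- ===== VERDICT =====
theorem clean_text_v1_5_spec : Claim_equal_clean_text_v1_5 := by
  intro text _
  unfold Spec_clean_text_v1_5 clean_text_v1_5 clean_text_v1_5_alt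
  simp only [mem_alpha_iff, if_false_swap, PySem.List.foldl_append_if_eq_filter,
    List.nil_append]
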